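-- pv_equiv track=rewrite | github.com/annmonrajijames/can_diagnostic_tool | PCAN_Decode_View/csvTostandardizedDBC.py | vector_bits
-- ===== SOURCE A (Python) =====
-- def vector_bits(start: int, length: int, byte_order: str):
--     """
--     Return the *exact* bit indices (0‑based) a signal occupies,
--     following Vector’s numbering:
--         • Intel  (little‑endian): ascending bits
--         • Motorola (big‑endian): descending bits inside each byte,
--           jump +8 at every byte boundary.
--     """
--     if byte_order.lower().startswith("l"):  # Intel / little‑endian
--         return list(range(start, start + length))
--
--     # Motorola / big‑endian (Vector rule)
--     bits = []
--     for i in range(length):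
--         byte_jump = i // 8
--         bit = start + 8 * byte_jump - (i % 8)
--         bits.append(bit)
--     return bits
-- ===== SOURCE B (Python) =====
-- def vector_bits(start: int, length: int, byte_order: str):
--     if byte_order.lower().startswith("l"):  # Intel / little-endian
--         return list(range(start, start + length))
--     # Motorola: emit whole descending 8-bit byte chunks, then the partial final chunk
--     bits = []
--     base = start
--     remaining = length
--     while remaining >= 8:
--         bits.extend(base - o for o in range(8))
--         base += 8
--         remaining -= 8
--     bits.extend(base - o for o in range(remaining))
--     return bits
-- ===== Notes on version B (the rewrite author's own statement) =====
-- stated objective: alternative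
-- what changed: Motorola branch is rewritten as a byte-by-byte loop that extends whole 8-bit descending chunks (jumping base by 8) plus a partial final chunk, instead of A's flat per-bit loop computing i//8 and i%8 for every index.
import Mathlib
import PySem

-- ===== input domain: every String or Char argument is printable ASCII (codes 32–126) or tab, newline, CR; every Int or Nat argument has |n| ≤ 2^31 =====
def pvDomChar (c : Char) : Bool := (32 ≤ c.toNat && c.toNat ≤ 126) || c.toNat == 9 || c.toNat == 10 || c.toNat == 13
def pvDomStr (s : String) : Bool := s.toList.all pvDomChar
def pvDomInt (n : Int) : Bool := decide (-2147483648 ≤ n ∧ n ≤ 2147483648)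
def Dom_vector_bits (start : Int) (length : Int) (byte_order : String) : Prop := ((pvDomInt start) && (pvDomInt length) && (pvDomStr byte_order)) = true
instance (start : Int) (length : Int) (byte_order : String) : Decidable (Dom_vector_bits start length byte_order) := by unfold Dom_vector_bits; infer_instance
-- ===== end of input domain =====

-- B replaces A's flat per-index Motorola loop (i//8, i%8 per bit) by a byte-by-byte
-- recursion emitting 8-bit descending chunks; same values, alternative decomposition.


-- ===== PORT A =====
def vector_bits (start : Int) (length : Int) (byte_order : String) : List Int :=
  if PySem.Str.startswith (PySem.Str.lower byte_order) "l" then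
    PySem.List.pyRange start (start + length) 1
  else
    (PySem.List.pyRange 0 length 1).foldl
      (fun bits i =>
        let byte_jump := PySem.Int.floordiv i 8
        let bit := start + 8 * byte_jump - PySem.Int.mod i 8
        bits ++ [bit]) []

-- ===== PORT B =====
def motLoop (bits : List Int) (base : Int) (remaining : Int) : List Int :=
  if h8 : 8 ≤ remaining then
    motLoop (bits ++ (PySem.List.pyRange 0 8 1).map (fun o => base - o)) (base + 8) (remaining - 8)
  else
    bits ++ (PySem.List.pyRange 0 remaining 1).map (fun o => base - o)
termination_by remaining.toNat
decreasing_by omega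

def vector_bits_alt (start : Int) (length : Int) (byte_order : String) : List Int :=
  if PySem.Str.startswith (PySem.Str.lower byte_order) "l" then
    PySem.List.pyRange start (start + length) 1
  else
    motLoop [] start length

-- ===== PRECONDITION & SPEC =====
def Spec_vector_bits (start : Int) (length : Int) (byte_order : String) (out : List Int) : Prop := out = vector_bits_alt start length byte_order
instance (start : Int) (length : Int) (byte_order : String) (out : List Int) : Decidable (Spec_vector_bits start length byte_order out) := by unfold Spec_vector_bits; infer_instance

-- ===== CLAIM (what is proved, stated in full; the proofs are below) =====
def Claim_equal_vector_bits : Prop := ∀ (start : Int) (length : Int) (byte_order : String), Dom_vector_bits start length byte_order → Spec_vector_bits start length byte_order (vector_bits start length byte_order)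

-- ===== LEMMAS AND PROOFS =====

-- the common closed form both loops compute
def bitAt (base : Int) (k : Nat) : Int := base + 8 * ((k / 8 : Nat) : Int) - ((k % 8 : Nat) : Int)

lemma motLoop_eq : ∀ (n : Nat) (bits : List Int) (base r : Int), r.toNat = n →
    motLoop bits base r = bits ++ (List.range n).map (bitAt base) := by
  intro n
  induction n using Nat.strong_induction_on with
  | _ n ih =>
    intro bits base r hn
    rw [motLoop]
    by_cases h8 : 8 ≤ r
    · have hlt : (r - 8).toNat < n := by omega
      rw [dif_pos h8, ih _ hlt _ (base + 8) (r - 8) rfl]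
      have hsplit : n = 8 + (r - 8).toNat := by omega
      rw [hsplit, List.range_add, List.map_append, List.append_assoc]
      congr 1
      congr 1
      · rw [PySem.List.pyRange_one]
        simp only [List.map_map]
        apply List.map_congr_left
        intro k hk
        simp only [List.mem_range] at hk
        simp only [Function.comp, bitAt]
        have h1 : k / 8 = 0 := by omega
        have h2 : k % 8 = k := by omega
        rw [h1, h2]
        push_cast
        ring
      · rw [List.map_map]
        apply List.map_congr_left
        intro k hk
        simp only [Function.comp, bitAt]
        have h1 : (8 + k) / 8 = k / 8 + 1 := by omega
        have h2 : (8 + k) % 8 = k % 8 := by omega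
        rw [h1, h2]
        push_cast
        ring
    · rw [dif_neg h8]
      congr 1
      rw [PySem.List.pyRange_one]
      have : (r - 0).toNat = n := by omega
      rw [this, List.map_map]
      apply List.map_congr_left
      intro k hk
      simp only [List.mem_range] at hk
      simp only [Function.comp, bitAt]
      have h1 : k / 8 = 0 := by omega
      have h2 : k % 8 = k := by omega
      rw [h1, h2]
      push_cast
      ring

lemma foldA_eq (start length : Int) :
    (PySem.List.pyRange 0 length 1).foldl
      (fun bits i =>
        let byte_jump := PySem.Int.floordiv i 8
        let bit := start + 8 * byte_jump - PySem.Int.mod i 8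
        bits ++ [bit]) []
    = (List.range length.toNat).map (bitAt start) := by
  rw [PySem.List.foldl_append_singleton_eq_map, PySem.List.pyRange_one]
  have : (length - 0).toNat = length.toNat := by omega
  rw [this, List.map_map, List.nil_append]
  apply List.map_congr_left
  intro k hk
  simp only [Function.comp, bitAt, zero_add]
  rw [PySem.Int.floordiv_eq_ediv_of_pos (by norm_num),
      PySem.Int.mod_eq_emod_of_pos (by norm_num)]
  omega

-- ===== VERDICT (by name: the statement is the Claim_ definition above) =====
theorem vector_bits_spec : Claim_equal_vector_bits := by
  intro start length byte_order _
  unfold Spec_vector_bits vector_bits vector_bits_alt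
  by_cases h : PySem.Str.startswith (PySem.Str.lower byte_order) "l" = true
  · rw [if_pos h, if_pos h]
  · rw [if_neg h, if_neg h, foldA_eq, motLoop_eq length.toNat [] start length rfl, List.nil_append]
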